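-- pv_equiv track=rewrite | github.com/METABPL/SoluminaImport | load_solumina.py | get_embedded
-- ===== SOURCE A (Python) =====
-- def get_embedded(desc):
--     names = []
--     start_pos = 0
--     while True:
--         idx = desc.find("${", start_pos)
--         if idx < 0:
--             return names
--         end_idx = desc.find("}", idx+1)
--         if end_idx < 0:
--             return names
--         names.append(desc[idx+2:end_idx])
--         start_pos = end_idx+1
-- ===== SOURCE B (Python) =====
-- def get_embedded(desc):
--     # One linear pass with an explicit two-state scanner (outside / inside a
--     # placeholder) instead of repeated str.find calls.
--     names = []
--     cur = None      # None = outside a placeholder; list of chars = inside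
--     prev_dollar = False
--     for ch in desc:
--         if cur is not None:
--             if ch == '}':
--                 names.append(''.join(cur))
--                 cur = None
--                 prev_dollar = False
--             else:
--                 cur.append(ch)
--         elif prev_dollar and ch == '{':
--             cur = []
--             prev_dollar = False
--         else:
--             prev_dollar = (ch == '$')
--     return names
-- ===== Notes on version B (the rewrite author's own statement) =====
-- stated objective: alternative
-- what changed: Replaced A's repeated str.find scanning loop (find '${' then find '}' with slicing) by a single left-to-right pass over the characters with an explicit two-state scanner (outside / inside a placeholder) that accumulates the current placeholder name.
import Mathlib
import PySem

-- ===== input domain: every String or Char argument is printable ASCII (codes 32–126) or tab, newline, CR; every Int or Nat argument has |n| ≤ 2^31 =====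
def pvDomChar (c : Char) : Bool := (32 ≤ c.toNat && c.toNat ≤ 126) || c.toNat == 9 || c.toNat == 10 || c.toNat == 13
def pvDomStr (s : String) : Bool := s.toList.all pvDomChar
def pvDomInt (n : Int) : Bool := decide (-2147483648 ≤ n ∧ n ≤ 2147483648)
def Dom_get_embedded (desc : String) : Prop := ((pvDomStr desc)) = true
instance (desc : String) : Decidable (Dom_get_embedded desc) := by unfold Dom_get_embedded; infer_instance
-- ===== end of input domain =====

-- B replaces A's repeated str.find scanning loop by a single linear pass with a
-- two-state character scanner (objective: alternative / idiomatic single pass).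

-- ===== PORT A =====

-- helper facts about str.find(sub, start), cited by the port's decreasing_by
lemma pvFindFrom_neg_of_gt (s sub : List Char) (k : Nat) (h : s.length < k) :
    PySem.Chars.findFrom s sub (k : Int) none = -1 := by
  simp [PySem.Chars.findFrom]; omega

lemma pvFindFrom_facts (s sub : List Char) (k : Nat)
    (h : ¬ PySem.Chars.findFrom s sub (k : Int) none < 0) :
    k ≤ s.length ∧ k ≤ (PySem.Chars.findFrom s sub (k : Int) none).toNat ∧
      (PySem.Chars.findFrom s sub (k : Int) none).toNat + sub.length ≤ s.length := by
  have hk : k ≤ s.length := by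
    by_contra hk
    rw [pvFindFrom_neg_of_gt s sub k (by omega)] at h
    omega
  have hne : PySem.Chars.findFrom s sub (k : Int) none ≠ -1 := by omega
  obtain ⟨ha, hb, _⟩ := PySem.Chars.findFrom_natCast_spec s sub k hk hne
  have hl := hb.length_le
  rw [List.length_drop] at hl
  have he := PySem.Chars.findFrom_natCast s sub k hk
  have hfind : PySem.Chars.find (List.drop k s) sub ≠ -1 := by
    intro hc
    rw [he, if_pos hc] at h
    omega
  have hval : PySem.Chars.findFrom s sub (k : Int) none
      = k + PySem.Chars.find (List.drop k s) sub := by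
    rw [he, if_neg hfind]
  have hfl := PySem.Chars.find_le_length (List.drop k s) sub
  rw [List.length_drop] at hfl
  exact ⟨hk, by omega, by omega⟩

-- literal port of A's while-loop (names / start_pos are the loop state)
def getEmbAux (desc : String) (names : List String) (start : Nat) : List String :=
  let idx := PySem.Str.findFrom desc "${" (start : Int) none
  if h1 : idx < 0 then names
  else
    let endIdx := PySem.Str.findFrom desc "}" (idx + 1) none
    if h2 : endIdx < 0 then names
    else
      getEmbAux desc (names ++ [PySem.Str.slice desc (some (idx + 2)) (some endIdx)])
        (endIdx.toNat + 1)
termination_by desc.toList.length + 1 - start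
decreasing_by
  have h1' : ¬ PySem.Str.findFrom desc "${" ((start : Int)) none < 0 := h1
  have h2' : ¬ PySem.Str.findFrom desc "}"
      (PySem.Str.findFrom desc "${" ((start : Int)) none + 1) none < 0 := h2
  rw [PySem.Str.findFrom_eq] at h1'
  rw [PySem.Str.findFrom_eq, PySem.Str.findFrom_eq] at h2'
  simp only [PySem.Str.findFrom_eq]
  obtain ⟨hk, hle, hlen⟩ := pvFindFrom_facts desc.toList "${".toList start h1'
  have h0 : ¬ PySem.Chars.findFrom desc.toList "${".toList ((start : Int)) none < 0 := h1'
  have hcast : PySem.Chars.findFrom desc.toList "${".toList ((start : Int)) none + 1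
      = (((PySem.Chars.findFrom desc.toList "${".toList ((start : Int)) none).toNat + 1 : Nat) : Int) := by
    omega
  rw [hcast] at h2' ⊢
  obtain ⟨_, hle2, hlen2⟩ := pvFindFrom_facts desc.toList "}".toList
      ((PySem.Chars.findFrom desc.toList "${".toList ((start : Int)) none).toNat + 1) h2'
  have e1 : ("${".toList).length = 2 := rfl
  have e2 : ("}".toList).length = 1 := rfl
  rw [e1] at hlen
  rw [e2] at hlen2
  omega

def get_embedded (desc : String) : List String := getEmbAux desc [] 0

-- ===== PORT B =====

-- literal port of B's loop body; state = (names, prev_dollar, cur);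
-- ''.join over the collected characters is ported as String.ofList (exact).
def pvStepB (st : List String × Bool × Option (List Char)) (ch : Char) :
    List String × Bool × Option (List Char) :=
  match st with
  | (names, prev, some cur) =>
    if ch = '}' then (names ++ [String.ofList cur], false, none)
    else (names, prev, some (cur ++ [ch]))
  | (names, prev, none) =>
    if prev && (ch == '{') then (names, false, some [])
    else (names, ch == '$', none)

def get_embedded_alt (desc : String) : List String :=
  (desc.toList.foldl pvStepB (([] : List String), false, (none : Option (List Char)))).1

-- ===== PRECONDITION & SPEC =====
def Spec_get_embedded (desc : String) (out : List String) : Prop := out = get_embedded_alt desc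
instance (desc : String) (out : List String) : Decidable (Spec_get_embedded desc out) := by unfold Spec_get_embedded; infer_instance

-- ===== CLAIM (what is proved, stated in full; the proofs are below) =====
def Claim_equal_get_embedded : Prop := ∀ (desc : String), Dom_get_embedded desc → Spec_get_embedded desc (get_embedded desc)

-- ===== LEMMAS AND PROOFS =====

-- the scanner stays outside while no "${" occurs
lemma pvRunOutside (t : List Char) (names : List String) (b : Bool)
    (hinf : ¬ ['$', '{'] <:+: t) (hb : b = true → t.head? ≠ some '{') :
    ∃ b', List.foldl pvStepB (names, b, none) t = (names, b', none) := by
  induction t generalizing b with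
  | nil => exact ⟨b, rfl⟩
  | cons c t ih =>
    have hstep : pvStepB (names, b, none) c = (names, c == '$', none) := by
      by_cases hc : c = '{'
      · have hbf : b = false := by
          cases b
          · rfl
          · exact absurd (by simp [hc] : (c :: t).head? = some '{') (hb rfl)
        simp [pvStepB, hbf]
      · simp [pvStepB, hc]
    rw [List.foldl_cons, hstep]
    refine ih (c == '$') (fun hinf' => hinf (List.infix_cons hinf')) ?_
    intro hd hh
    apply hinf
    rcases t with _ | ⟨d, t⟩
    · simp at hh
    · simp at hh
      have hc : c = '$' := by simpa using hd
      exact List.IsPrefix.isInfix (by simp [hc, hh])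

-- the scanner collects characters while inside and no '}' occurs
lemma pvRunInside (u : List Char) (names : List String) (b : Bool) (cur : List Char)
    (hu : '}' ∉ u) :
    List.foldl pvStepB (names, b, some cur) u = (names, b, some (cur ++ u)) := by
  induction u generalizing cur with
  | nil => simp
  | cons c u ih =>
    have hc : ¬ c = '}' := fun h => hu (by simp [h])
    rw [List.foldl_cons]
    simp only [pvStepB, if_neg hc]
    rw [ih (cur ++ [c]) (fun h => hu (by simp [h]))]
    simp

-- value of find for a single-character needle with an explicit first occurrence
lemma pvFindSingleton (p : List Char) (c : Char) (rest : List Char) (hp : c ∉ p) :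
    PySem.Chars.find (p ++ c :: rest) [c] = (p.length : Int) := by
  have hnn : 0 ≤ PySem.Chars.find (p ++ c :: rest) [c] := by
    rw [PySem.Chars.find_nonneg_iff, List.singleton_infix_iff]
    simp
  obtain ⟨hpre, hmin⟩ := PySem.Chars.find_spec hnn
  set f := (PySem.Chars.find (p ++ c :: rest) [c]).toNat with hf
  have hle : f ≤ p.length := by
    by_contra hgt
    exact hmin p.length (by omega) (by simp)
  have hfe : f = p.length := by
    rcases Nat.lt_or_ge f p.length with hlt | hge
    · exfalso
      have := hpre
      have hget : (p ++ c :: rest)[f]? = some c := by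
        rcases this with ⟨tl, htl⟩
        have hdrop : (p ++ c :: rest).drop f = c :: tl := htl.symm
        rw [← List.head?_drop, hdrop]
        rfl
      rw [List.getElem?_append_left hlt] at hget
      exact hp (List.mem_of_getElem? hget)
    · omega
  omega

-- the main invariant: A's loop from position k equals running B's scanner
-- over the suffix desc[k:], starting outside with prev_dollar = False
lemma pvMain (N : Nat) (desc : String) (names : List String) (k : Nat)
    (hk : k ≤ desc.toList.length) (hN : desc.toList.length - k ≤ N) :
    getEmbAux desc names k
      = (List.foldl pvStepB (names, false, none) (desc.toList.drop k)).1 := by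
  induction N using Nat.strong_induction_on generalizing names k with
  | _ N ih =>
  by_cases hfind : PySem.Chars.find (desc.toList.drop k) ['$', '{'] = -1
  · -- no further "${": A stops, B's scanner stays outside
    have hidx : PySem.Str.findFrom desc "${" ((k : Nat) : Int) none = -1 := by
      rw [PySem.Str.findFrom_eq,
        PySem.Chars.findFrom_natCast desc.toList "${".toList k hk]
      simp only [show "${".toList = ['$', '{'] from rfl, hfind, if_pos]
    rw [getEmbAux]
    simp only [hidx]
    rw [dif_pos (by omega)]
    rw [PySem.Chars.find_eq_neg_one_iff] at hfind
    obtain ⟨b', hb'⟩ := pvRunOutside (desc.toList.drop k) names false hfind (by simp)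
    rw [hb']
  · -- a "${" at absolute position k + i'
    have hge : 0 ≤ PySem.Chars.find (desc.toList.drop k) ['$', '{'] := by
      have := PySem.Chars.neg_one_le_find (desc.toList.drop k) ['$', '{']
      omega
    obtain ⟨hpre, hmin⟩ := PySem.Chars.find_spec hge
    set i' := (PySem.Chars.find (desc.toList.drop k) ['$', '{']).toNat with hi'
    have hival : PySem.Chars.find (desc.toList.drop k) ['$', '{'] = (i' : Int) := by omega
    obtain ⟨u, hu⟩ := hpre
    have hilen : i' + 2 + u.length = (desc.toList.drop k).length := by
      have h1 := congrArg List.length hu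
      have h2 := PySem.Chars.find_le_length (desc.toList.drop k) ['$', '{']
      simp [List.length_drop] at h1 h2 ⊢
      omega
    have htlen : (desc.toList.drop k).length = desc.toList.length - k := by
      simp
    have hturn : desc.toList.drop k
        = (desc.toList.drop k).take i' ++ '$' :: '{' :: u := by
      conv_lhs => rw [← List.take_append_drop i' (desc.toList.drop k)]
      rw [← hu]
      rfl
    have hidx : PySem.Str.findFrom desc "${" ((k : Nat) : Int) none
        = ((k + i' : Nat) : Int) := by
      rw [PySem.Str.findFrom_eq,
        PySem.Chars.findFrom_natCast desc.toList "${".toList k hk]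
      simp only [show "${".toList = ['$', '{'] from rfl, hival]
      push_cast
      ring
    have hdropki : desc.toList.drop (k + i' + 1) = '{' :: u := by
      have : desc.toList.drop (k + i' + 1) = ((desc.toList.drop k).drop i').drop 1 := by
        rw [List.drop_drop, List.drop_drop]
        congr 1
      rw [this, ← hu]
      rfl
    have hdropki2 : desc.toList.drop (k + i' + 2) = u := by
      have : desc.toList.drop (k + i' + 2) = (desc.toList.drop (k + i' + 1)).drop 1 := by
        rw [List.drop_drop]
      rw [this, hdropki]
      rfl
    have hk1 : k + i' + 1 ≤ desc.toList.length := by omega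
    have hpre_no : ¬ ['$', '{'] <:+: (desc.toList.drop k).take i' := by
      intro hin
      have hIn := (PySem.Chars.isIn_iff_infix _ _).mpr hin
      obtain ⟨j, hj⟩ := (PySem.Chars.exists_prefix_drop_iff_isIn _ _).mpr hIn
      have hjd : ((desc.toList.drop k).take i').drop j
          = ((desc.toList.drop k).drop j).take (i' - j) := List.drop_take
      have hj2 : ['$', '{'] <+: (desc.toList.drop k).drop j := by
        rw [hjd] at hj
        exact hj.trans (List.take_prefix _ _)
      have hjlt : j < i' := by
        have := hj.length_le
        rw [hjd] at this
        simp at this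
        omega
      exact hmin j hjlt hj2
    obtain ⟨b', hb'⟩ := pvRunOutside ((desc.toList.drop k).take i') names false hpre_no (by simp)
    have hs1 : pvStepB (names, b', none) '$' = (names, true, none) := by
      cases b' <;> simp [pvStepB]
    have hs2 : pvStepB (names, true, none) '{' = (names, false, some []) := by
      simp [pvStepB]
    by_cases hmem : '}' ∈ u
    · -- closed placeholder: A records desc[k+i'+2 : k+i'+2+|v|], both continue after it
      obtain ⟨v, w, huvw, hvmem⟩ : ∃ v w, u = v ++ '}' :: w ∧ '}' ∉ v := by
        refine ⟨u.takeWhile (fun c => decide (c ≠ '}')), (u.dropWhile (fun c => decide (c ≠ '}'))).tail, ?_, ?_⟩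
        · have hne : u.dropWhile (fun c => decide (c ≠ '}')) ≠ [] := by
            rw [ne_eq, List.dropWhile_eq_nil_iff]
            intro hall
            have := hall '}' hmem
            simp at this
          have hhead := List.head_dropWhile_not (fun c => decide (c ≠ '}')) hne
          have hcons := List.cons_head_tail hne
          have : (u.dropWhile (fun c => decide (c ≠ '}'))).head hne = '}' := by
            simpa using hhead
          rw [this] at hcons
          conv_lhs => rw [← List.takeWhile_append_dropWhile
            (p := fun c => decide (c ≠ '}')) (l := u), ← hcons]
        · intro hmv
          have := List.mem_takeWhile_imp hmv
          simp at this
      have hfind2 : PySem.Chars.find ('{' :: u) ['}'] = ((v.length + 1 : Nat) : Int) := by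
        have : '{' :: u = ('{' :: v) ++ '}' :: w := by rw [huvw]; rfl
        rw [this, pvFindSingleton ('{' :: v) '}' w (by simp [hvmem])]
        simp
      have hend : PySem.Str.findFrom desc "}" (((k + i' : Nat) : Int) + 1) none
          = ((k + i' + v.length + 2 : Nat) : Int) := by
        rw [show ((k + i' : Nat) : Int) + 1 = ((k + i' + 1 : Nat) : Int) by push_cast; ring,
          PySem.Str.findFrom_eq,
          PySem.Chars.findFrom_natCast desc.toList "}".toList (k + i' + 1) hk1]
        simp only [show "}".toList = ['}'] from rfl, hdropki, hfind2]
        rw [if_neg (by omega)]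
        push_cast
        ring
      have hslice : PySem.Str.slice desc (some (((k + i' : Nat) : Int) + 2))
          (some ((k + i' + v.length + 2 : Nat) : Int)) = String.ofList v := by
        symm
        rw [String.ofList_eq, PySem.Str.toList_slice, PySem.Chars.slice_eq_listSlice,
          show ((k + i' : Nat) : Int) + 2 = ((k + i' + 2 : Nat) : Int) by push_cast; ring,
          PySem.List.slice_natCast, hdropki2, huvw,
          show k + i' + v.length + 2 - (k + i' + 2) = v.length by omega]
        rw [List.take_left]
      have hw : desc.toList.drop (k + i' + v.length + 3) = w := by
        have : desc.toList.drop (k + i' + v.length + 3)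
            = (desc.toList.drop (k + i' + 2)).drop (v.length + 1) := by
          rw [List.drop_drop]
          congr 1
          omega
        rw [this, hdropki2, huvw]
        have : v.length + 1 = (v ++ '}' :: w).length - w.length := by simp; omega
        rw [show v ++ '}' :: w = (v ++ ['}']) ++ w by simp]
        rw [show v.length + 1 = (v ++ ['}']).length by simp]
        rw [List.drop_left]
      -- evaluate A one step
      have hulen : u.length = v.length + 1 + w.length := by
        rw [huvw, List.length_append, List.length_cons]
        omega
      rw [getEmbAux]
      simp only [hidx]
      rw [dif_neg (show ¬ ((k + i' : Nat) : Int) < 0 by omega)]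
      rw [hend]
      rw [dif_neg (show ¬ ((k + i' + v.length + 2 : Nat) : Int) < 0 by omega)]
      rw [hslice,
        show ((k + i' + v.length + 2 : Nat) : Int).toNat + 1 = k + i' + v.length + 3 by omega]
      -- recurse via the induction hypothesis
      have hrec := ih (N - 1) (by omega) (names ++ [String.ofList v]) (k + i' + v.length + 3)
        (by omega) (by omega)
      rw [hrec, hw]
      -- evaluate B over take ++ '$' :: '{' :: v ++ '}' :: w
      conv_rhs => rw [hturn, huvw]
      rw [show (desc.toList.drop k).take i' ++ '$' :: '{' :: (v ++ '}' :: w)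
          = ((desc.toList.drop k).take i' ++ '$' :: '{' :: v) ++ '}' :: w by simp]
      rw [List.foldl_append, List.foldl_append, hb']
      simp only [List.foldl_cons]
      rw [hs1, hs2, pvRunInside v names false [] hvmem]
      simp [pvStepB]
    · -- unclosed placeholder: A stops, B's scanner never leaves the inside state
      have hfind2 : PySem.Chars.find ('{' :: u) ['}'] = -1 := by
        rw [PySem.Chars.find_eq_neg_one_iff, List.singleton_infix_iff]
        simp [hmem]
      have hend : PySem.Str.findFrom desc "}" (((k + i' : Nat) : Int) + 1) none = -1 := by
        rw [show ((k + i' : Nat) : Int) + 1 = ((k + i' + 1 : Nat) : Int) by push_cast; ring,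
          PySem.Str.findFrom_eq,
          PySem.Chars.findFrom_natCast desc.toList "}".toList (k + i' + 1) hk1]
        simp only [show "}".toList = ['}'] from rfl, hdropki, hfind2, if_pos]
      rw [getEmbAux]
      simp only [hidx]
      rw [dif_neg (show ¬ ((k + i' : Nat) : Int) < 0 by omega)]
      rw [hend]
      rw [dif_pos (show (-1 : Int) < 0 by norm_num)]
      conv_rhs => rw [hturn]
      rw [List.foldl_append, hb']
      simp only [List.foldl_cons]
      rw [hs1, hs2, pvRunInside u names false [] hmem]

-- ===== VERDICT (by name: the statement is the Claim_ definition above) =====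
theorem get_embedded_spec : Claim_equal_get_embedded := by
  intro desc _
  unfold Spec_get_embedded get_embedded get_embedded_alt
  simpa using pvMain desc.toList.length desc [] 0 (by omega) (by omega)
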